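-- pv_equiv track=rewrite | github.com/subinmun1997/my_python-for-coding-test | BAEKJOON/코테재활/프로그래머스 재활/Lv2/짝지어 제거하기.py | solution
-- ===== SOURCE A (Python) =====
-- def solution(s):
--     stack = []
--     for i in s:
--         if not stack or stack[-1] != i:
--             stack.append(i)
--         else:
--             stack.pop()
--
--     return 0 if stack else 1
-- ===== SOURCE B (Python) =====
-- def solution(s):
--     cur = s
--     while True:
--         nxt = []
--         i = 0
--         n = len(cur)
--         while i < n:
--             if i + 1 < n and cur[i] == cur[i + 1]:
--                 i += 2
--             else:
--                 nxt.append(cur[i])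
--                 i += 1
--         if len(nxt) == len(cur):
--             break
--         cur = nxt
--     return 0 if cur else 1
-- ===== Notes on version B (the rewrite author's own statement) =====
-- stated objective: alternative
-- what changed: Replaces the stack with a fixed-point computation: repeatedly scan the string left to right deleting every adjacent equal pair in one pass, until a pass removes nothing, then test emptiness.
import Mathlib
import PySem

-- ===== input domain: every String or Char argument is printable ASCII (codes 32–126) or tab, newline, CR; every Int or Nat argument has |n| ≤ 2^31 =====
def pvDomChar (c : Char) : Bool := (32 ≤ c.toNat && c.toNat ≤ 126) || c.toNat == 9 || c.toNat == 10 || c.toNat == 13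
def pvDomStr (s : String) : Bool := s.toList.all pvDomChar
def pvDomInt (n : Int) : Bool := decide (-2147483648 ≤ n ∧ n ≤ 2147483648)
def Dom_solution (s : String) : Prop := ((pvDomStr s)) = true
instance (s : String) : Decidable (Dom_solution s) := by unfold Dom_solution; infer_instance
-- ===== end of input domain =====

-- B replaces A's stack by repeated one-pass deletion of adjacent equal pairs until a
-- fixed point, then tests emptiness; same return value, different algorithm.

-- ===== PORT A =====
-- one iteration of A's for-loop: push i if stack empty or top ≠ i, else pop
def pyStep (st : List Char) (i : Char) : List Char :=
  if st = [] ∨ st.getLast? ≠ some i then st ++ [i] else st.dropLast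

def solution (s : String) : Int :=
  let stack := s.toList.foldl pyStep []
  if stack ≠ [] then 0 else 1

-- ===== PORT B =====
-- one left-to-right pass of Source B's inner while-loop: drop each adjacent equal pair once
def pass1 : List Char → List Char
  | [] => []
  | [a] => [a]
  | a :: b :: t => if a = b then pass1 t else a :: pass1 (b :: t)
termination_by l => l.length

-- used by `collapse`'s decreasing_by (a pass is a sublist of its input)
theorem pass1_sublist : ∀ (l : List Char), (pass1 l).Sublist l
  | [] => by simp [pass1]
  | [a] => by simp [pass1]
  | a :: b :: t => by
    unfold pass1
    split
    · exact ((pass1_sublist t).cons b).cons a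
    · exact (pass1_sublist (b :: t)).cons₂ a
termination_by l => l.length

-- Source B's outer while-loop: repeat passes until a pass removes nothing
def collapse (l : List Char) : List Char :=
  if ((pass1 l).length = l.length) then l else collapse (pass1 l)
termination_by l.length
decreasing_by
  exact lt_of_le_of_ne ((pass1_sublist l).length_le) (by omega)

def solution_alt (s : String) : Int :=
  let cur := collapse s.toList
  if cur ≠ [] then 0 else 1

-- ===== PRECONDITION & SPEC =====
def Spec_solution (s : String) (out : Int) : Prop := out = solution_alt s
instance (s : String) (out : Int) : Decidable (Spec_solution s out) := by unfold Spec_solution; infer_instance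

-- ===== CLAIM (what is proved, stated in full; the proofs are below) =====
def Claim_equal_solution : Prop := ∀ (s : String), Dom_solution s → Spec_solution s (solution s)

-- ===== LEMMAS AND PROOFS =====

-- cons-representation of A's stack step (top of stack at the head)
def cstep (st : List Char) (i : Char) : List Char :=
  if st.head? = some i then st.tail else i :: st

def run (st l : List Char) : List Char := l.foldl cstep st

theorem pyStep_reverse (st : List Char) (i : Char) :
    pyStep st i = (cstep st.reverse i).reverse := by
  unfold pyStep cstep
  rcases List.eq_nil_or_concat st with h | ⟨u, a, h⟩
  · subst h; simp
  · subst h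
    by_cases hi : a = i <;> simp [hi]

theorem foldl_pyStep_reverse (l : List Char) : ∀ (st : List Char),
    l.foldl pyStep st = (run st.reverse l).reverse := by
  induction l with
  | nil => intro st; simp [run]
  | cons a t ih =>
    intro st
    simp only [List.foldl_cons, run, pyStep_reverse, ih, List.reverse_reverse]

theorem chain_cstep {st : List Char} (i : Char)
    (h : List.IsChain (· ≠ ·) st) : List.IsChain (· ≠ ·) (cstep st i) := by
  cases st with
  | nil =>
    rw [show cstep [] i = [i] from by simp [cstep]]
    exact List.isChain_singleton i
  | cons x r =>
    by_cases hx : x = i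
    · rw [show cstep (x :: r) i = r from by simp [cstep, hx]]
      simpa using h.tail
    · rw [show cstep (x :: r) i = i :: x :: r from by simp [cstep, fun e : x = i => hx e]]
      exact List.isChain_cons_cons.mpr ⟨fun e => hx e.symm, h⟩

-- processing two equal chars on a reduced stack is the identity
theorem cstep_pair (st : List Char) (a : Char)
    (h : List.IsChain (· ≠ ·) st) : cstep (cstep st a) a = st := by
  cases st with
  | nil => simp [cstep]
  | cons x r =>
    by_cases hx : x = a
    · subst hx
      rw [show cstep (x :: r) x = r from by simp [cstep]]
      cases r with
      | nil => simp [cstep]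
      | cons y r' =>
        have hxy : x ≠ y := (List.isChain_cons_cons.mp h).1
        simp [cstep, hxy.symm]
    · rw [show cstep (x :: r) a = a :: x :: r from by simp [cstep, fun e : x = a => hx e]]
      simp [cstep]

-- a single pass does not change the stack-machine result (on a reduced stack)
theorem run_pass1 : ∀ (l : List Char), ∀ (st : List Char),
    List.IsChain (· ≠ ·) st → run st (pass1 l) = run st l
  | [] => by intro st _; simp [pass1]
  | [a] => by intro st _; simp [pass1]
  | a :: b :: t => by
    intro st h
    by_cases hab : a = b
    · subst hab
      have e1 : pass1 (a :: a :: t) = pass1 t := by rw [pass1]; simp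
      rw [e1, run_pass1 t st h,
        show run st (a :: a :: t) = run st t from by simp [run, cstep_pair st a h]]
    · have e1 : pass1 (a :: b :: t) = a :: pass1 (b :: t) := by rw [pass1]; simp [hab]
      rw [e1,
        show run st (a :: pass1 (b :: t)) = run (cstep st a) (pass1 (b :: t)) from by simp [run],
        show run st (a :: b :: t) = run (cstep st a) (b :: t) from by simp [run]]
      exact run_pass1 (b :: t) (cstep st a) (chain_cstep a h)
termination_by l => l.length

-- a length-preserving pass means the list is already reduced
theorem pass1_fixed_chain : ∀ (l : List Char),
    (pass1 l).length = l.length → List.IsChain (· ≠ ·) l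
  | [] => fun _ => List.isChain_nil
  | [a] => fun _ => List.isChain_singleton a
  | a :: b :: t => by
    intro h
    rw [pass1] at h
    by_cases hab : a = b
    · exfalso
      rw [if_pos hab] at h
      have := (pass1_sublist t).length_le
      simp at h; omega
    · rw [if_neg hab] at h
      simp only [List.length_cons, Nat.add_right_cancel_iff] at h
      exact List.isChain_cons_cons.mpr ⟨hab, pass1_fixed_chain (b :: t) h⟩
termination_by l => l.length

theorem collapse_chain : ∀ (l : List Char), List.IsChain (· ≠ ·) (collapse l) := by
  intro l
  induction l using collapse.induct with
  | case1 l hfix =>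
    rw [collapse, if_pos hfix]
    exact pass1_fixed_chain l hfix
  | case2 l hfix ih =>
    rw [collapse, if_neg hfix]
    exact ih

theorem run_collapse (l : List Char) : run [] (collapse l) = run [] l := by
  induction l using collapse.induct with
  | case1 l hfix => rw [collapse, if_pos hfix]
  | case2 l hfix ih =>
    rw [collapse, if_neg hfix, ih, run_pass1 l [] List.isChain_nil]

-- running a reduced word on a compatible stack just pushes it
theorem run_reduced : ∀ (r : List Char), ∀ (st : List Char),
    List.IsChain (· ≠ ·) r → (∀ a, r.head? = some a → st.head? ≠ some a) →
    run st r = r.reverse ++ st := by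
  intro r
  induction r with
  | nil => intro st _ _; simp [run]
  | cons a t ih =>
    intro st hr hcomp
    have hpush : cstep st a = a :: st := by
      unfold cstep
      rw [if_neg (hcomp a rfl)]
    have hstep : run st (a :: t) = run (a :: st) t := by
      simp [run, hpush]
    rw [hstep, ih (a :: st) ?_ ?_]
    · simp
    · simpa using hr.tail
    · intro b hb
      cases t with
      | nil => simp at hb
      | cons c t' =>
        simp only [List.head?_cons, Option.some.injEq] at hb
        subst hb
        have hac : a ≠ c := (List.isChain_cons_cons.mp hr).1
        simp [hac]

-- ===== VERDICT (by name: the statement is the Claim_ definition above) =====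
theorem solution_spec : Claim_equal_solution := by
  intro s _
  unfold Spec_solution solution solution_alt
  rw [foldl_pyStep_reverse]
  have h1 : run [] s.toList = run [] (collapse s.toList) := (run_collapse s.toList).symm
  have h2 : run [] (collapse s.toList) = (collapse s.toList).reverse ++ [] :=
    run_reduced (collapse s.toList) [] (collapse_chain s.toList) (by simp)
  rw [List.reverse_nil, h1, h2]
  simp only [List.append_nil, List.reverse_reverse, ne_eq]
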